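-- pv_equiv track=rewrite | github.com/sionkimadd/sql_admin | backend/request_handler.py | parse_insert_data
-- ===== SOURCE A (Python) =====
-- def parse_insert_data(column_names, column_values):
--     parsed_values = [value.split(",") for value in column_values]
--     max_length = max(len(values) for values in parsed_values) if parsed_values else 0
--
--     for values in parsed_values:
--         values.extend([None] * (max_length - len(values)))
--
--     data = []
--     for row_values in zip(*parsed_values):
--         row = {
--             column_names[i]: row_values[i].strip() if row_values[i] is not None else None
--             for i in range(len(column_names))
--         }
--         data.append(row)
--     return data
-- ===== SOURCE B (Python) =====
-- def parse_insert_data(column_names, column_values):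
--     _END = object()
--     iters = [iter(value.split(",")) for value in column_values]
--     data = []
--     while True:
--         heads = [next(it, _END) for it in iters]
--         if all(h is _END for h in heads):
--             return data
--         data.append({
--             column_names[i]: (heads[i].strip() if heads[i] is not _END else None)
--             for i in range(len(column_names))
--         })
-- ===== Notes on version B (the rewrite author's own statement) =====
-- stated objective: alternative
-- what changed: B never computes max_length, never pads and never transposes: it turns each split column into an iterator and streams rows by pulling one head per column (sentinel for exhausted iterators) until all iterators are exhausted.
import Mathlib
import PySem

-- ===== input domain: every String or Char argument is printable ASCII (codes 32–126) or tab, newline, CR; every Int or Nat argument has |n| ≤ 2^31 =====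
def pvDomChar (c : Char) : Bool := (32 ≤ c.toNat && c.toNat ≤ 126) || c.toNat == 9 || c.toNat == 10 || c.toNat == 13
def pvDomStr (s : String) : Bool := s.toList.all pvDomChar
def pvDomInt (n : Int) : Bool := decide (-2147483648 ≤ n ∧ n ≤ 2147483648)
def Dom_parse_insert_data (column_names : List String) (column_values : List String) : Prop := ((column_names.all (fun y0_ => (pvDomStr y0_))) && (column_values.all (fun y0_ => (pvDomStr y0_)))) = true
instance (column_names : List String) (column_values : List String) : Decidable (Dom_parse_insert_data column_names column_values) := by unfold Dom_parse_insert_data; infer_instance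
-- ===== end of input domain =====

-- B replaces A's compute-max/pad/zip-transpose pipeline by streaming co-iteration: per-column
-- iterators are consumed one head per row (sentinel = exhausted) until all are exhausted
-- (alternative decomposition, same O(rows·cols) cost).

-- ===== PORT A =====
-- zip(*ls) by hand (PySem has only binary List.zip): exactly min(len)·rows, each row the heads.
-- The fuel is the minimum length, so every list is nonempty at each step and filterMap head? collects all heads.
def pvZipGo {α : Type} (fuel : Nat) (ls : List (List α)) : List (List α) :=
  match fuel with
  | 0 => []
  | fuel + 1 => (ls.filterMap List.head?) :: pvZipGo fuel (ls.map List.tail)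

def pvZipStar {α : Type} (ls : List (List α)) : List (List α) :=
  match ls with
  | [] => []
  | l :: rest => pvZipGo ((rest.map List.length).foldl min l.length) (l :: rest)

def parse_insert_data (column_names : List String) (column_values : List String) : List (List (String × Option String)) :=
  -- value.split(",") : sep ≠ "" so split? is always some; .getD [] is exact here
  let parsed_values := column_values.map (fun value => (PySem.Str.split? value ",").getD [])
  let max_length : Nat :=
    if parsed_values = [] then 0
    else PySem.List.maxD (parsed_values.map List.length) (fun n => n) 0
  -- values.extend([None] * (max_length - len(values))) on a fresh Option-valued copy
  let padded := parsed_values.map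
    (fun values => values.map some ++ List.replicate (max_length - values.length) (none : Option String))
  (pvZipStar padded).map (fun row_values =>
    ((PySem.List.pyRange 0 (PySem.List.len column_names)).foldl
      (fun row i =>
        row.insert (PySem.List.pyGetD column_names i "")
          ((PySem.List.pyGetD row_values i none).map PySem.Str.strip))
      PySem.Dict.empty).items)

-- ===== PORT B =====
-- termination lemmas for the while-True loop (cited by the port's decreasing_by)
lemma pvSumTail_le {α : Type} : ∀ (ls : List (List α)),
    ((ls.map List.tail).map List.length).sum ≤ (ls.map List.length).sum := by
  intro ls
  induction ls with
  | nil => simp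
  | cons l rest ih =>
    simp only [List.map_cons, List.sum_cons]
    have : l.tail.length ≤ l.length := by
      simp [List.length_tail]
    omega

lemma pvSumTail_lt {α : Type} : ∀ (ls : List (List α)),
    ¬ ((ls.map List.head?).all Option.isNone = true) →
    ((ls.map List.tail).map List.length).sum < (ls.map List.length).sum := by
  intro ls
  induction ls with
  | nil => intro h; simp at h
  | cons l rest ih =>
    intro h
    simp only [List.map_cons, List.sum_cons]
    cases l with
    | nil =>
      simp only [List.map_cons, List.all_cons, List.head?] at h
      simp only [Option.isNone_none, Bool.true_and] at h
      have := ih h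
      simp only [List.tail_nil, List.length_nil]
      omega
    | cons a t =>
      have h1 : (a :: t).tail.length < (a :: t).length := by simp
      have h2 := pvSumTail_le rest
      omega

-- while True: pull one head per iterator (none = sentinel _END); stop when all exhausted,
-- else append the row built from the heads and loop on the advanced iterators.
def pvAltGo (column_names : List String) (iters : List (List String))
    (data : List (List (String × Option String))) : List (List (String × Option String)) :=
  if (iters.map List.head?).all Option.isNone then data
  else
    pvAltGo column_names (iters.map List.tail)
      (data ++ [((PySem.List.pyRange 0 (PySem.List.len column_names)).foldl
        (fun row i =>
          row.insert (PySem.List.pyGetD column_names i "")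
            ((PySem.List.pyGetD (iters.map List.head?) i none).map PySem.Str.strip))
        PySem.Dict.empty).items])
termination_by (iters.map List.length).sum
decreasing_by
  rename_i h
  simp only [List.map_subtype, List.unattach_attach] at h ⊢
  exact pvSumTail_lt iters h

def parse_insert_data_alt (column_names : List String) (column_values : List String) : List (List (String × Option String)) :=
  pvAltGo column_names (column_values.map (fun value => (PySem.Str.split? value ",").getD [])) []

-- ===== PRECONDITION & SPEC =====
-- Pre_ excludes exactly the inputs where A raises IndexError (nonempty column_values with more
-- column_names than column_values); B raises IndexError there too.
def Pre_parse_insert_data (column_names : List String) (column_values : List String) : Prop :=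
  column_values = [] ∨ column_names.length ≤ column_values.length
instance (column_names : List String) (column_values : List String) : Decidable (Pre_parse_insert_data column_names column_values) := by unfold Pre_parse_insert_data; infer_instance

def pvWitness_parse_insert_data : List String × List String := (["a", "b"], ["1,2", " x "])

def Spec_parse_insert_data (column_names : List String) (column_values : List String) (out : List (List (String × Option String))) : Prop := out = parse_insert_data_alt column_names column_values
instance (column_names : List String) (column_values : List String) (out : List (List (String × Option String))) : Decidable (Spec_parse_insert_data column_names column_values out) := by unfold Spec_parse_insert_data; infer_instance

-- ===== CLAIM (what is proved, stated in full; the proofs are below) =====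
def Claim_equal_parse_insert_data : Prop := ∀ (column_names : List String) (column_values : List String), Dom_parse_insert_data column_names column_values → Pre_parse_insert_data column_names column_values → Spec_parse_insert_data column_names column_values (parse_insert_data column_names column_values)

-- ===== LEMMAS AND PROOFS =====

-- canonical row: dict (as fold over column indices) from a per-column list of optional cells
def pvMkRow (names : List String) (cells : List (Option String)) : List (String × Option String) :=
  ((PySem.List.pyRange 0 (PySem.List.len names)).foldl
    (fun row i => row.insert (PySem.List.pyGetD names i "") (PySem.List.pyGetD cells i none))
    PySem.Dict.empty).items

lemma pvGetD_tail {α : Type} (l : List α) (r : Nat) (d : α) :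
    l.tail.getD r d = l.getD (r + 1) d := by
  cases l <;> rfl

lemma pvFilterMap_head {α : Type} (ls : List (List α)) (d : α)
    (h : ∀ l ∈ ls, l ≠ []) :
    ls.filterMap List.head? = ls.map (fun l => l.getD 0 d) := by
  induction ls with
  | nil => rfl
  | cons l rest ih =>
    cases l with
    | nil => exact absurd rfl (h _ (List.mem_cons_self))
    | cons a t =>
      simp only [List.filterMap_cons, List.head?, List.map_cons, List.getD_cons_zero]
      exact congrArg _ (ih (fun l hl => h l (List.mem_cons_of_mem _ hl)))

lemma pvZipGo_eq {α : Type} (d : α) :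
    ∀ (n : Nat) (ls : List (List α)), (∀ l ∈ ls, n ≤ l.length) →
      pvZipGo n ls = (List.range n).map (fun r => ls.map (fun l => l.getD r d)) := by
  intro n
  induction n with
  | zero => intro ls _; rfl
  | succ n ih =>
    intro ls h
    have hne : ∀ l ∈ ls, l ≠ [] := by
      intro l hl hnil
      have := h l hl
      simp [hnil] at this
    have htail : ∀ l ∈ ls.map List.tail, n ≤ l.length := by
      intro l hl
      rcases List.mem_map.mp hl with ⟨l₀, hl₀, rfl⟩
      have := h l₀ hl₀
      have : n + 1 ≤ l₀.length := this
      have hlen : l₀.tail.length = l₀.length - 1 := List.length_tail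
      omega
    simp only [pvZipGo, ih (ls.map List.tail) htail, List.range_succ_eq_map,
      List.map_cons, List.map_map]
    refine congrArg₂ _ (pvFilterMap_head ls d hne) ?_
    refine List.map_congr_left (fun r _ => ?_)
    simp only [Function.comp]
    refine List.map_congr_left (fun l _ => ?_)
    exact pvGetD_tail l r d

lemma pvFoldlMin_const (L : Nat) : ∀ (xs : List Nat), (∀ x ∈ xs, x = L) → xs.foldl min L = L := by
  intro xs
  induction xs with
  | nil => intro _; rfl
  | cons x t ih =>
    intro h
    have hx := h x (List.mem_cons_self)
    simp only [List.foldl_cons, hx, min_self]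
    exact ih (fun y hy => h y (List.mem_cons_of_mem _ hy))

lemma pvReplicate_getD_none {α : Type} (m r : Nat) :
    (List.replicate m (none : Option α)).getD r none = none := by
  simp only [List.getD, List.getElem?_replicate]
  split <;> rfl

lemma pvFoldlMax_zero : ∀ (xs : List Nat), (∀ x ∈ xs, x = 0) → xs.foldl max 0 = 0 := by
  intro xs
  induction xs with
  | nil => intro _; rfl
  | cons x t ih =>
    intro h
    have hx := h x (List.mem_cons_self)
    simp only [List.foldl_cons, hx, Nat.max_self]
    exact ih (fun y hy => h y (List.mem_cons_of_mem _ hy))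

lemma pvFoldlMax_sub_one : ∀ (xs : List Nat) (a : Nat),
    (xs.map (fun x => x - 1)).foldl max (a - 1) = (xs.foldl max a) - 1 := by
  intro xs
  induction xs with
  | nil => intro a; rfl
  | cons x t ih =>
    intro a
    simp only [List.map_cons, List.foldl_cons]
    have : max (a - 1) (x - 1) = max a x - 1 := by omega
    rw [this, ih]

lemma pvMemLeFoldlMax : ∀ (xs : List Nat) (a y : Nat), y ∈ xs → y ≤ xs.foldl max a := by
  intro xs
  induction xs with
  | nil => intro a y h; simp at h
  | cons x t ih =>
    intro a y h
    rcases List.mem_cons.mp h with rfl | h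
    · calc y ≤ max a y := le_max_right _ _
        _ ≤ t.foldl max (max a y) := (PySem.List.le_foldl_max t _).1
    · exact ih _ y h

-- the while-True loop, characterised: rows r = 0 … max-length−1, cell (i,r) = cols[i][r]? stripped
lemma pvAltGo_eq (names : List String) :
    ∀ (n : Nat) (cols : List (List String)) (data : List (List (String × Option String))),
      (cols.map List.length).sum = n → names.length ≤ cols.length →
      pvAltGo names cols data =
        data ++ (List.range ((cols.map List.length).foldl max 0)).map
          (fun r => pvMkRow names (cols.map (fun col => (col[r]?).map PySem.Str.strip))) := by
  intro n
  induction n using Nat.strong_induction_on with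
  | _ n ih =>
    intro cols data hsum hlen
    by_cases hstop : (cols.map List.head?).all Option.isNone = true
    · -- all iterators exhausted: every column is empty, max length 0, no rows
      have hempty : ∀ c ∈ cols, c = [] := by
        intro c hc
        have := List.all_eq_true.mp hstop _ (List.mem_map_of_mem hc)
        cases c with
        | nil => rfl
        | cons a t => simp [List.head?] at this
      have hmax : (cols.map List.length).foldl max 0 = 0 := by
        refine pvFoldlMax_zero _ (fun x hx => ?_)
        rcases List.mem_map.mp hx with ⟨c, hc, rfl⟩
        rw [hempty c hc]; rfl
      rw [pvAltGo.eq_def]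
      simp only [hstop, if_pos, hmax, List.range_zero, List.map_nil, List.append_nil]
    · -- some head remains: emit one row, recurse on the tails
      set L := (cols.map List.length).foldl max 0 with hLdef
      have hpos : 1 ≤ L := by
        have h : ∃ o ∈ cols.map List.head?, ¬ o.isNone = true := by
          simpa [List.all_eq_true] using hstop
        rcases h with ⟨o, ho, hne⟩
        rcases List.mem_map.mp ho with ⟨c, hc, rfl⟩
        cases c with
        | nil => simp [List.head?] at hne
        | cons a t =>
          have : (a :: t).length ∈ cols.map List.length := List.mem_map_of_mem hc
          have := pvMemLeFoldlMax (cols.map List.length) 0 _ this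
          simp only [List.length_cons] at this
          omega
      have hLtail : ((cols.map List.tail).map List.length).foldl max 0 = L - 1 := by
        have h1 : (cols.map List.tail).map List.length = (cols.map List.length).map (fun x => x - 1) := by
          simp only [List.map_map]
          exact List.map_congr_left (fun c _ => by simp [List.length_tail])
        rw [h1]
        have := pvFoldlMax_sub_one (cols.map List.length) 0
        simpa using this
      have hdec := pvSumTail_lt cols hstop
      rw [pvAltGo.eq_def]
      simp only [hstop, if_neg, Bool.false_eq_true, not_false_iff]
      rw [ih _ (by omega) (cols.map List.tail) _ rfl (by simpa using hlen), hLtail]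
      have hLsplit : L = (L - 1) + 1 := by omega
      rw [List.append_assoc]
      refine congrArg _ ?_
      conv_rhs => rw [hLsplit]
      rw [List.range_succ_eq_map, List.map_cons, List.map_map, List.singleton_append]
      refine congrArg₂ List.cons ?_ ?_
      · -- the emitted row is row 0 of the canonical form
        refine congrArg PySem.Dict.items ?_
        refine PySem.List.foldl_congr_mem _ _ _ _ (fun acc j hj => ?_)
        have hj' := PySem.List.mem_pyRange_one.mp hj
        obtain ⟨k, rfl⟩ : ∃ k : Nat, j = (k : Int) := ⟨j.toNat, (Int.toNat_of_nonneg hj'.1).symm⟩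
        have hk : k < names.length := by
          have := hj'.2; simp only [PySem.List.len_eq] at this; exact_mod_cast this
        have hkc : k < cols.length := by omega
        refine congrArg₂ _ rfl ?_
        rw [PySem.List.pyGetD_natCast, PySem.List.pyGetD_natCast,
          List.getD_eq_getElem?_getD, List.getD_eq_getElem?_getD]
        simp only [List.getElem?_map, List.getElem?_eq_getElem hkc]
        simp [List.head?_eq_getElem?]
      · -- rows 1 … L−1 over cols are rows 0 … L−2 over the tails
        refine List.map_congr_left (fun r _ => ?_)
        simp only [Function.comp]
        refine congrArg _ ?_
        simp only [List.map_map]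
        refine List.map_congr_left (fun c _ => ?_)
        simp [List.getElem?_tail]

-- ===== VERDICT (by name: the statement is the Claim_ definition above) =====
theorem parse_insert_data_spec : Claim_equal_parse_insert_data := by
  intro column_names column_values _ hpre
  unfold Spec_parse_insert_data parse_insert_data parse_insert_data_alt
  cases hval : column_values with
  | nil =>
    simp [pvZipStar]
    rw [pvAltGo.eq_def]
    simp
  | cons v₀ vrest =>
    subst hval
    have hlen : column_names.length ≤ (v₀ :: vrest).length := by
      rcases hpre with h | h
      · exact absurd h (by simp)
      · exact h
    set P : List (List String) :=
      (v₀ :: vrest).map (fun value => (PySem.Str.split? value ",").getD []) with hP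
    have hPlen : P.length = (v₀ :: vrest).length := by simp [hP]
    have hPne : P ≠ [] := by simp [hP]
    set L : Nat := PySem.List.maxD (P.map List.length) (fun n => n) 0 with hL
    have hif : (if P = [] then 0 else PySem.List.maxD (P.map List.length) (fun n => n) 0) = L := by
      rw [if_neg hPne]
    have hle : ∀ vs ∈ P, vs.length ≤ L := by
      intro vs hvs
      exact PySem.List.le_maxD_id (P.map List.length) 0 vs.length (List.mem_map_of_mem hvs)
    -- A's max (first-maximal maxD) is B's running max
    have hLfold : (P.map List.length).foldl max 0 = L := by
      cases hQ : P.map List.length with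
      | nil => exact absurd (List.map_eq_nil_iff.mp hQ) hPne
      | cons x t =>
        rw [hL, hQ, PySem.List.maxD, PySem.List.max?_id_cons]
        simp
    set pad : List String → List (Option String) :=
      (fun values => values.map some ++ List.replicate (L - values.length) (none : Option String)) with hpad
    have hpadlen : ∀ l ∈ P.map pad, l.length = L := by
      intro l hl
      rcases List.mem_map.mp hl with ⟨vs, hvs, rfl⟩
      have := hle vs hvs
      simp [hpad]
      omega
    -- the zip side becomes a map over List.range L
    have hzip : pvZipStar (P.map pad) = (List.range L).map
        (fun r => (P.map pad).map (fun l => l.getD r none)) := by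
      cases hC : P.map pad with
      | nil => exact absurd (List.map_eq_nil_iff.mp hC) hPne
      | cons p0 prest =>
        have hfuel : (prest.map List.length).foldl min p0.length = L := by
          have h0 : p0.length = L := hpadlen p0 (by rw [hC]; exact List.mem_cons_self)
          rw [h0]
          refine pvFoldlMin_const L _ (fun x hx => ?_)
          rcases List.mem_map.mp hx with ⟨l, hl, rfl⟩
          exact hpadlen l (by rw [hC]; exact List.mem_cons_of_mem _ hl)
        show pvZipStar (p0 :: prest) = _
        simp only [pvZipStar, hfuel]
        rw [pvZipGo_eq (none : Option String) L (p0 :: prest)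
          (fun l hl => le_of_eq (hpadlen l (hC ▸ hl)).symm), ← hC]
    simp only [hif]
    rw [← hpad, hzip]
    rw [pvAltGo_eq column_names ((P.map List.length).sum) P [] rfl (by omega), hLfold,
      List.nil_append, List.map_map]
    refine List.map_congr_left (fun r hr => ?_)
    have hrL : r < L := List.mem_range.mp hr
    simp only [Function.comp]
    unfold pvMkRow
    refine congrArg PySem.Dict.items ?_
    refine PySem.List.foldl_congr_mem _ _ _ _ (fun acc j hj => ?_)
    have hj' := PySem.List.mem_pyRange_one.mp hj
    obtain ⟨k, rfl⟩ : ∃ k : Nat, j = (k : Int) := ⟨j.toNat, (Int.toNat_of_nonneg hj'.1).symm⟩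
    have hk : k < column_names.length := by
      have := hj'.2; simp only [PySem.List.len_eq] at this; exact_mod_cast this
    have hkP : k < P.length := by omega
    refine congrArg₂ _ rfl ?_
    -- cell values agree: (pad P[k]).getD r none = P[k][r]?
    have hAcell : PySem.List.pyGetD ((P.map pad).map (fun l => l.getD r none)) (k : Int) none
        = (pad P[k]).getD r none := by
      have hkpp : k < (P.map pad).length := by simpa using hkP
      rw [PySem.List.pyGetD_natCast, List.getD_eq_getElem?_getD]
      simp only [List.getElem?_map, List.getElem?_eq_getElem hkP]
      rfl
    have hBcell : PySem.List.pyGetD (P.map (fun col => (col[r]?).map PySem.Str.strip)) (k : Int) none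
        = (P[k][r]?).map PySem.Str.strip := by
      rw [PySem.List.pyGetD_natCast, List.getD_eq_getElem?_getD]
      simp only [List.getElem?_map, List.getElem?_eq_getElem hkP]
      rfl
    rw [hAcell, hBcell, hpad]
    by_cases hcase : r < P[k].length
    · rw [List.getD_eq_getElem?_getD, List.getElem?_append_left (by simpa using hcase)]
      simp only [List.getElem?_map, List.getElem?_eq_getElem hcase]
      rfl
    · rw [List.getD_eq_getElem?_getD, List.getElem?_append_right (by simpa using not_lt.mp hcase)]
      have := pvReplicate_getD_none (α := String) (L - P[k].length) (r - (P[k].map some).length)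
      rw [List.getD_eq_getElem?_getD] at this
      rw [this, List.getElem?_eq_none (by omega)]
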